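-- pv_equiv track=rewrite | github.com/Anurudh-28/ai-mentor-chatbot | utils/web_search.py | should_web_search
-- ===== SOURCE A (Python) =====
-- def should_web_search(user_text: str) -> bool:
--     t = (user_text or "").lower()
--     triggers = [
--     "latest",
--     "today",
--     "2025",
--     "2026",
--     "current",
--     "news",
--     "ai jobs",
--     "machine learning jobs",
--     "salary",
--     "trend",
--     "hiring",
-- ]
--     return any(x in t for x in triggers)
-- ===== SOURCE B (Python) =====
-- TRIGGERS = (
--     "latest",
--     "today",
--     "2025",
--     "2026",
--     "current",
--     "news",
--     "ai jobs",
--     "machine learning jobs",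
--     "salary",
--     "trend",
--     "hiring",
-- )
--
--
-- def should_web_search(user_text: str) -> bool:
--     # One left-to-right pass: at each position, test all triggers at once as prefixes.
--     t = (user_text or "").lower()
--     return any(t.startswith(TRIGGERS, i) for i in range(len(t)))
-- ===== Notes on version B (the rewrite author's own statement) =====
-- stated objective: alternative
-- what changed: Replaces k independent substring scans ('x in t' per trigger) with a single left-to-right pass over the text that tests all triggers as prefixes of each suffix via one tuple-argument startswith.
import Mathlib
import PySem

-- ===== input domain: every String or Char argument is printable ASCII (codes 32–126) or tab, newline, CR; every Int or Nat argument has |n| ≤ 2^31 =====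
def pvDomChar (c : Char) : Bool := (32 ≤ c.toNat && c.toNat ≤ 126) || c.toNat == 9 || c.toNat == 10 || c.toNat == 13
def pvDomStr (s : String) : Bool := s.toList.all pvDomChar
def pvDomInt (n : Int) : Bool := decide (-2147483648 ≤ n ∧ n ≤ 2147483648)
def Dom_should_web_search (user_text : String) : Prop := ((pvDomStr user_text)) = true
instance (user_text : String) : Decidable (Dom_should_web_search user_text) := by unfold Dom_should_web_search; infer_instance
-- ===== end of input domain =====

-- B replaces the per-trigger substring scans with a single left-to-right pass testing all triggers as prefixes at each suffix (alternative, same cost).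


-- ===== PORT A =====
def pvTriggersA : List String :=
  ["latest", "today", "2025", "2026", "current", "news",
   "ai jobs", "machine learning jobs", "salary", "trend", "hiring"]

def should_web_search (user_text : String) : Bool :=
  let t := PySem.Str.lower (if user_text == "" then "" else user_text)
  pvTriggersA.any (fun x => PySem.Str.isIn x t)

-- ===== PORT B =====
def pvTriggersB : List (List Char) := pvTriggersA.map String.toList

-- t.startswith(TRIGGERS, i) for 0 <= i: exact as "some trigger is a prefix of t[i:]" (drop i)
def should_web_search_alt (user_text : String) : Bool :=
  let t := PySem.Str.lower (if user_text == "" then "" else user_text)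
  (PySem.List.pyRange 0 (PySem.Str.len t) 1).any
    (fun i => pvTriggersB.any (fun p => p.isPrefixOf (t.toList.drop i.toNat)))

-- ===== PRECONDITION & SPEC =====
def Spec_should_web_search (user_text : String) (out : Bool) : Prop := out = should_web_search_alt user_text
instance (user_text : String) (out : Bool) : Decidable (Spec_should_web_search user_text out) := by unfold Spec_should_web_search; infer_instance

-- ===== CLAIM (what is proved, stated in full; the proofs are below) =====
def Claim_equal_should_web_search : Prop := ∀ (user_text : String), Dom_should_web_search user_text → Spec_should_web_search user_text (should_web_search user_text)

-- ===== LEMMAS AND PROOFS =====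

theorem pvScan_iff (cs : List Char) :
    ((List.range cs.length).any
        (fun i => pvTriggersB.any (fun p => p.isPrefixOf (cs.drop i))) = true) ↔
      ∃ p ∈ pvTriggersB, p <:+: cs := by
  rw [List.any_eq_true]
  constructor
  · rintro ⟨i, _, hi⟩
    rw [List.any_eq_true] at hi
    obtain ⟨p, hp, hpre⟩ := hi
    exact ⟨p, hp, List.infix_iff_prefix_suffix.2
      ⟨cs.drop i, List.isPrefixOf_iff_prefix.1 hpre, List.drop_suffix i cs⟩⟩
  · rintro ⟨p, hp, hinf⟩
    obtain ⟨u, v, huv⟩ := hinf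
    have hall : ∀ q ∈ pvTriggersB, q ≠ [] := by decide
    have hne : p ≠ [] := hall p hp
    refine ⟨u.length, List.mem_range.2 ?_, ?_⟩
    · have : cs.length = u.length + (p.length + v.length) := by
        rw [← huv]; simp [List.length_append]
      have hp1 : 0 < p.length := List.length_pos_iff.2 hne
      omega
    · have hdrop : cs.drop u.length = p ++ v := by
        rw [← huv, List.append_assoc, List.drop_left]
      exact List.any_eq_true.2 ⟨p, hp,
        List.isPrefixOf_iff_prefix.2 (hdrop ▸ List.prefix_append p v)⟩

theorem pvAlt_iff (t : String) :
    ((PySem.List.pyRange 0 (PySem.Str.len t) 1).any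
        (fun i => pvTriggersB.any (fun p => p.isPrefixOf (t.toList.drop i.toNat))) = true) ↔
      ∃ p ∈ pvTriggersB, p <:+: t.toList := by
  rw [PySem.Str.len_eq, PySem.List.pyRange_zero_nat, List.any_map]
  have h := pvScan_iff t.toList
  simpa [Function.comp] using h

-- ===== VERDICT (by name: the statement is the Claim_ definition above) =====
theorem should_web_search_spec : Claim_equal_should_web_search := by
  intro u _
  unfold Spec_should_web_search should_web_search should_web_search_alt
  show (pvTriggersA.any fun x =>
      PySem.Str.isIn x (PySem.Str.lower (if u == "" then "" else u))) =
    ((PySem.List.pyRange 0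
        (PySem.Str.len (PySem.Str.lower (if u == "" then "" else u))) 1).any
      fun i => pvTriggersB.any fun p =>
        p.isPrefixOf ((PySem.Str.lower (if u == "" then "" else u)).toList.drop i.toNat))
  rw [Bool.eq_iff_iff, List.any_eq_true, pvAlt_iff]
  constructor
  · rintro ⟨x, hx, hin⟩
    exact ⟨x.toList, List.mem_map.2 ⟨x, hx, rfl⟩,
      (PySem.Str.isIn_iff_infix x _).1 hin⟩
  · rintro ⟨p, hp, hinf⟩
    obtain ⟨x, hx, rfl⟩ := List.mem_map.1 hp
    exact ⟨x, hx, (PySem.Str.isIn_iff_infix x _).2 hinf⟩
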